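-- pv_equiv track=rewrite | github.com/Monkey-Tools/monkey-do | src/utilities/route_matcher.py | routes_match
-- ===== SOURCE A (Python) =====
-- def routes_match(config_route: str, request_route: str) -> bool:
--     """checks if the routs match, ignores parameterized portions of the route"""
--     config_route_chunks = config_route.split('/')
--     request_route_chunks = request_route.split('/')
--     crc_len = len(config_route_chunks)
--     rrc_len = len(request_route_chunks)
--     if crc_len != rrc_len:
--         return False
--     for i in range(crc_len):
--         if '{' not in config_route_chunks[i] and \
--            '}' not in config_route_chunks[i] and \
--            config_route_chunks[i] != request_route_chunks[i]:
--             return False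
--     return True
-- ===== SOURCE B (Python) =====
-- def _split_first(s):
--     """first segment of s and the remainder after the first '/', or None."""
--     i = 0
--     while i < len(s):
--         if s[i] == '/':
--             return s[:i], s[i + 1:]
--         i += 1
--     return s, None
--
--
-- def routes_match(config_route: str, request_route: str) -> bool:
--     """checks if the routes match, ignores parameterized portions of the route"""
--     c, r = config_route, request_route
--     while True:
--         cseg, crest = _split_first(c)
--         rseg, rrest = _split_first(r)
--         if '{' not in cseg and '}' not in cseg and cseg != rseg:
--             return False
--         if crest is None or rrest is None:
--             return crest is None and rrest is None
--         c, r = crest, rrest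
-- ===== Notes on version B (the rewrite author's own statement) =====
-- stated objective: alternative
-- what changed: B replaces A's split-both-strings-into-chunk-lists-then-index-loop with a single streaming scan: it peels one segment at a time off each string with a character scan and compares segments as it goes, never materialising the chunk lists or checking lengths up front.
import Mathlib
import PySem

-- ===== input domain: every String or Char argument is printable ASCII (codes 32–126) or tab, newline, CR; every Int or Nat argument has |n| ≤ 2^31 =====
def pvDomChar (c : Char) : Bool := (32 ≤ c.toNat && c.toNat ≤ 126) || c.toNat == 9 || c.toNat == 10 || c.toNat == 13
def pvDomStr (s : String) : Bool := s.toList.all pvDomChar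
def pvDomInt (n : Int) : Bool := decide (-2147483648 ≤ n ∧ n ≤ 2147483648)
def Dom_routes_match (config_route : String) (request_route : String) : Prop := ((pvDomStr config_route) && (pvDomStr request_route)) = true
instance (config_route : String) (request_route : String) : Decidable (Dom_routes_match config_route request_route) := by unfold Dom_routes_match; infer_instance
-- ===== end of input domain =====

-- B replaces A's split-into-chunk-lists-plus-index-loop with a single streaming scan that
-- peels one segment at a time off each string; same O(n) cost, different structure (objective: alternative).

-- ===== PORT A =====
def routes_match (config_route : String) (request_route : String) : Bool :=
  let config_route_chunks := PySem.Chars.splitOn config_route.toList ['/']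
  let request_route_chunks := PySem.Chars.splitOn request_route.toList ['/']
  let crc_len : Int := config_route_chunks.length
  let rrc_len : Int := request_route_chunks.length
  if crc_len ≠ rrc_len then false
  else
    (PySem.List.pyRange 0 crc_len 1).all fun i =>
      let cc := PySem.List.pyGetD config_route_chunks i []
      PySem.Chars.isIn ['{'] cc || PySem.Chars.isIn ['}'] cc ||
        cc == PySem.List.pyGetD request_route_chunks i []

-- ===== PORT B =====
-- _split_first: scan for the first '/', return the segment before it and (optionally) the rest.
def pvSplitFirst : List Char → List Char × Option (List Char)
  | [] => ([], none)
  | c :: cs =>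
    if c = '/' then ([], some cs)
    else
      let p := pvSplitFirst cs
      (c :: p.1, p.2)

-- needed by pvLoop's termination argument
theorem pvSplitFirst_rest_lt : ∀ (s r : List Char), (pvSplitFirst s).2 = some r → r.length < s.length := by
  intro s
  induction s with
  | nil => intro r h; simp [pvSplitFirst] at h
  | cons c cs ih =>
    intro r h
    by_cases hc : c = '/'
    · simp [pvSplitFirst, hc] at h
      subst h; simp
    · simp [pvSplitFirst, hc] at h
      have := ih r h
      simp; omega

def pvLoop (c r : List Char) : Bool :=
  let cseg := (pvSplitFirst c).1
  let rseg := (pvSplitFirst r).1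
  if !(PySem.Chars.isIn ['{'] cseg) && !(PySem.Chars.isIn ['}'] cseg) && (cseg != rseg) then
    false
  else
    match hc : (pvSplitFirst c).2, (pvSplitFirst r).2 with
    | some c', some r' => pvLoop c' r'
    | none, none => true
    | _, _ => false
termination_by c.length
decreasing_by exact pvSplitFirst_rest_lt c c' hc

def routes_match_alt (config_route : String) (request_route : String) : Bool :=
  pvLoop config_route.toList request_route.toList

-- ===== PRECONDITION & SPEC =====
def Spec_routes_match (config_route : String) (request_route : String) (out : Bool) : Prop :=
  out = routes_match_alt config_route request_route
instance (config_route : String) (request_route : String) (out : Bool) : Decidable (Spec_routes_match config_route request_route out) := by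
  unfold Spec_routes_match; infer_instance

-- ===== CLAIM =====
def Claim_equal_routes_match : Prop :=
  ∀ (config_route : String) (request_route : String),
    Dom_routes_match config_route request_route →
    Spec_routes_match config_route request_route (routes_match config_route request_route)

-- ===== LEMMAS AND PROOFS =====

-- reference chunk decomposition: Python's s.split('/')
def pvChunks : List Char → List (List Char)
  | [] => [[]]
  | c :: cs => if c = '/' then [] :: pvChunks cs else (pvChunks cs).modifyHead (c :: ·)

theorem pvChunks_ne_nil (s : List Char) : pvChunks s ≠ [] := by
  induction s with
  | nil => simp [pvChunks]
  | cons c cs ih =>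
    simp only [pvChunks]
    split
    · simp
    · cases h : pvChunks cs with
      | nil => exact absurd h ih
      | cons hd tl => simp [List.modifyHead]

def pvPred (a b : List Char) : Bool :=
  PySem.Chars.isIn ['{'] a || PySem.Chars.isIn ['}'] a || a == b

-- the segment-wise matching both programs compute
def pvM : List (List Char) → List (List Char) → Bool
  | [], [] => true
  | a :: as, b :: bs => pvPred a b && pvM as bs
  | _, _ => false

theorem pvM_ne_length : ∀ (as bs : List (List Char)), as.length ≠ bs.length → pvM as bs = false := by
  intro as
  induction as with
  | nil => intro bs h; cases bs <;> simp_all [pvM]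
  | cons a as ih =>
    intro bs h
    cases bs with
    | nil => simp [pvM]
    | cons b bs =>
      simp only [pvM]
      have : as.length ≠ bs.length := by simp at h; omega
      simp [ih bs this]

-- A side: characterise splitOn.go for the one-character separator '/'
theorem splitOn_go_eq : ∀ (fuel : Nat) (l cur : List Char) (acc : List (List Char)),
    l.length ≤ fuel →
    PySem.Chars.splitOn.go ['/'] fuel l cur acc
      = acc.reverse ++ (pvChunks l).modifyHead (cur.reverse ++ ·) := by
  intro fuel
  induction fuel with
  | zero =>
    intro l cur acc h
    have : l = [] := by cases l <;> simp_all
    subst this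
    simp [PySem.Chars.splitOn.go, pvChunks, List.modifyHead]
  | succ fuel ih =>
    intro l cur acc h
    cases l with
    | nil => simp [PySem.Chars.splitOn.go, pvChunks, List.modifyHead]
    | cons c rest =>
      by_cases hc : c = '/'
      · subst hc
        rw [show PySem.Chars.splitOn.go ['/'] (fuel+1) ('/' :: rest) cur acc
              = PySem.Chars.splitOn.go ['/'] fuel rest [] (cur.reverse :: acc) by
            simp [PySem.Chars.splitOn.go, List.isPrefixOf]]
        rw [ih rest [] (cur.reverse :: acc) (by simp at h; omega)]
        simp only [pvChunks, if_true, List.modifyHead]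
        cases pvChunks rest <;> simp
      · rw [show PySem.Chars.splitOn.go ['/'] (fuel+1) (c :: rest) cur acc
              = PySem.Chars.splitOn.go ['/'] fuel rest (c :: cur) acc by
            simp only [PySem.Chars.splitOn.go, List.isPrefixOf, Bool.and_eq_true, beq_iff_eq]
            rw [if_neg (by intro hh; exact absurd hh.1.symm hc)]]
        rw [ih rest (c :: cur) acc (by simp at h; omega)]
        simp only [pvChunks, if_neg hc]
        obtain ⟨hd, tl, he⟩ : ∃ hd tl, pvChunks rest = hd :: tl := by
          cases hp : pvChunks rest with
          | nil => exact absurd hp (pvChunks_ne_nil rest)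
          | cons hd tl => exact ⟨hd, tl, rfl⟩
        simp [he, List.modifyHead]

theorem splitOn_eq_pvChunks (s : List Char) :
    PySem.Chars.splitOn s ['/'] = pvChunks s := by
  have := splitOn_go_eq (s.length + 1) s [] [] (by omega)
  simpa [PySem.Chars.splitOn] using this.trans (by
    obtain ⟨hd, tl, he⟩ : ∃ hd tl, pvChunks s = hd :: tl := by
      cases hp : pvChunks s with
      | nil => exact absurd hp (pvChunks_ne_nil s)
      | cons hd tl => exact ⟨hd, tl, rfl⟩
    simp [he, List.modifyHead])

-- A's index loop equals pvM on the suffixes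
theorem A_all_eq : ∀ (as : List (List Char)) (bs AS BS : List (List Char)) (k : Nat),
    AS.length = BS.length → as = AS.drop k → bs = BS.drop k →
    ((PySem.List.pyRange k AS.length 1).all fun i =>
        pvPred (PySem.List.pyGetD AS i []) (PySem.List.pyGetD BS i []))
      = pvM as bs := by
  intro as
  induction as with
  | nil =>
    intro bs AS BS k hlen ha hb
    have hk : AS.length ≤ k := by
      by_contra hlt
      rw [List.drop_eq_getElem_cons (by omega : k < AS.length)] at ha
      exact List.cons_ne_nil _ _ ha.symm
    have hbs : bs = [] := by
      have := congrArg List.length hb; simp at this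
      cases bs with
      | nil => rfl
      | cons b bs' => simp at this; omega
    subst hbs
    have hr : PySem.List.pyRange (k : Int) (AS.length : Int) 1 = [] := by
      simp only [PySem.List.pyRange]
      split <;> simp_all
    simp [hr, pvM]
  | cons a as' ih =>
    intro bs AS BS k hlen ha hb
    have hk : k < AS.length := by
      by_contra hge
      rw [List.drop_eq_nil_of_le (by omega)] at ha
      exact (List.cons_ne_nil a as') ha
    have hkb : k < BS.length := by omega
    have hA := List.drop_eq_getElem_cons hk
    have hB := List.drop_eq_getElem_cons hkb
    rw [hA] at ha
    have hah : a = AS[k] := by injection ha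
    have hat : as' = AS.drop (k + 1) := by injection ha
    rw [hB] at hb
    have hr : PySem.List.pyRange (k : Int) (AS.length : Int) 1
        = (k : Int) :: PySem.List.pyRange ((k : Int) + 1) (AS.length : Int) 1 := by
      exact PySem.List.pyRange_one_cons (by exact_mod_cast hk)
    rw [hr, List.all_cons]
    have hg1 : PySem.List.pyGetD AS (k : Int) [] = AS[k] := by
      rw [PySem.List.pyGetD_natCast]
      simp [List.getD_eq_getElem?_getD, List.getElem?_eq_getElem hk]
    have hg2 : PySem.List.pyGetD BS (k : Int) [] = BS[k] := by
      rw [PySem.List.pyGetD_natCast]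
      simp [List.getD_eq_getElem?_getD, List.getElem?_eq_getElem hkb]
    have hcast : ((k : Int) + 1) = ((k + 1 : Nat) : Int) := by push_cast; ring
    rw [hg1, hg2, hcast, ih (BS.drop (k + 1)) AS BS (k + 1) hlen hat rfl]
    subst hb hah
    simp [pvM]

-- B side: pvChunks through pvSplitFirst
theorem pvChunks_splitFirst (s : List Char) :
    pvChunks s = (pvSplitFirst s).1 ::
      (match (pvSplitFirst s).2 with
       | none => []
       | some r => pvChunks r) := by
  induction s with
  | nil => simp [pvChunks, pvSplitFirst]
  | cons c cs ih =>
    by_cases hc : c = '/'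
    · simp [pvChunks, pvSplitFirst, hc]
    · simp only [pvChunks, pvSplitFirst, if_neg hc]
      rw [ih]
      simp [List.modifyHead]

theorem pvM_chunks (c r : List Char) :
    pvM (pvChunks c) (pvChunks r)
      = (pvPred (pvSplitFirst c).1 (pvSplitFirst r).1 &&
          match (pvSplitFirst c).2, (pvSplitFirst r).2 with
          | some c', some r' => pvM (pvChunks c') (pvChunks r')
          | none, none => true
          | _, _ => false) := by
  rw [pvChunks_splitFirst c, pvChunks_splitFirst r]
  cases hc : (pvSplitFirst c).2 <;> cases hr : (pvSplitFirst r).2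
  · simp [pvM]
  · rename_i r'
    obtain ⟨hd, tl, he⟩ : ∃ hd tl, pvChunks r' = hd :: tl := by
      cases hp : pvChunks r' with
      | nil => exact absurd hp (pvChunks_ne_nil r')
      | cons hd tl => exact ⟨hd, tl, rfl⟩
    simp [pvM, he]
  · rename_i c'
    obtain ⟨hd, tl, he⟩ : ∃ hd tl, pvChunks c' = hd :: tl := by
      cases hp : pvChunks c' with
      | nil => exact absurd hp (pvChunks_ne_nil c')
      | cons hd tl => exact ⟨hd, tl, rfl⟩
    simp [pvM, he]
  · simp [pvM]

theorem pvGuard_eq (a b : List Char) :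
    (!(PySem.Chars.isIn ['{'] a) && !(PySem.Chars.isIn ['}'] a) && (a != b)) = !(pvPred a b) := by
  unfold pvPred
  cases PySem.Chars.isIn ['{'] a <;> cases PySem.Chars.isIn ['}'] a <;> cases hab : a == b <;>
    simp_all

theorem pvLoop_eq_pvM : ∀ (c r : List Char), pvLoop c r = pvM (pvChunks c) (pvChunks r) := by
  intro c r
  induction c, r using pvLoop.induct with
  | case1 c r _ _ hg =>
    rw [pvLoop, pvM_chunks, pvGuard_eq]
    rw [pvGuard_eq] at hg
    have hp : pvPred (pvSplitFirst c).1 (pvSplitFirst r).1 = false := by simpa using hg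
    simp [hp]
  | case2 c r _ _ hg c' r' hc hr ih =>
    rw [pvLoop, pvM_chunks, pvGuard_eq]
    rw [pvGuard_eq] at hg
    have hp : pvPred (pvSplitFirst c).1 (pvSplitFirst r).1 = true := by simpa using hg
    rw [if_neg (by simp [hp])]
    simp only [hp, Bool.true_and, hc, hr]
    split <;> simp_all
  | case3 c r _ _ hg hc hr =>
    rw [pvLoop, pvM_chunks, pvGuard_eq]
    rw [pvGuard_eq] at hg
    have hp : pvPred (pvSplitFirst c).1 (pvSplitFirst r).1 = true := by simpa using hg
    rw [if_neg (by simp [hp])]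
    simp only [hp, Bool.true_and, hc, hr]
    split <;> try simp_all
  | case4 c r _ _ hg hss hnn =>
    rw [pvLoop, pvM_chunks, pvGuard_eq]
    rw [pvGuard_eq] at hg
    have hp : pvPred (pvSplitFirst c).1 (pvSplitFirst r).1 = true := by simpa using hg
    rw [if_neg (by simp [hp])]
    simp only [hp, Bool.true_and]

-- ===== VERDICT =====
theorem routes_match_spec : Claim_equal_routes_match := by
  unfold Claim_equal_routes_match Spec_routes_match
  intro c r _
  unfold routes_match routes_match_alt
  rw [splitOn_eq_pvChunks, splitOn_eq_pvChunks, pvLoop_eq_pvM]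
  by_cases h : (pvChunks c.toList).length = (pvChunks r.toList).length
  · have hif : ¬ (((pvChunks c.toList).length : Int) ≠ ((pvChunks r.toList).length : Int)) := by
      simp [h]
    rw [if_neg hif]
    have := A_all_eq (pvChunks c.toList) (pvChunks r.toList)
      (pvChunks c.toList) (pvChunks r.toList) 0 h (by simp) (by simp)
    simpa using this
  · have hif : (((pvChunks c.toList).length : Int) ≠ ((pvChunks r.toList).length : Int)) := by
      exact fun he => h (by exact_mod_cast he)
    rw [if_pos hif, pvM_ne_length _ _ h]
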